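-- pv_equiv track=rewrite | github.com/Jinwooooo/algorithm-archive | Programmers/lonelyAlphabet_121683.py | solution
-- ===== SOURCE A (Python) =====
-- from collections import defaultdict
--
-- def solution(input_string):
--     q_input = list(map(str, input_string))
--     lonely_dict = defaultdict(list)
--
--     prev_elem = ''
--     while q_input:
--         curr_elem = q_input.pop()
--
--         if prev_elem == curr_elem:
--             continue
--
--         if len(lonely_dict[curr_elem]) == 0:
--             lonely_dict[curr_elem] = [1,1]
--             prev_elem = curr_elem
--         else:
--             lonely_dict[curr_elem][0] += 1
--             lonely_dict[curr_elem][1] += 1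
--             prev_elem = curr_elem
--
--     result = []
--     for dict_elem in lonely_dict:
--         if lonely_dict[dict_elem][0] >= 2 and lonely_dict[dict_elem][1] >= 2:
--             result.append(dict_elem)
--
--     if len(result) == 0:
--         result = 'N'
--     else:
--         result.sort()
--         result = ''.join(result)
--
--     return result
-- ===== SOURCE B (Python) =====
-- from collections import Counter
--
-- def solution(input_string):
--     # collapse maximal runs to one representative each, then tally representatives
--     keys = []
--     prev = None
--     for ch in input_string:
--         if ch != prev:
--             keys.append(ch)
--             prev = ch
--     counts = Counter(keys)
--     lonely = sorted(ch for ch in counts if counts[ch] >= 2)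
--     return ''.join(lonely) if lonely else 'N'
-- ===== Notes on version B (the rewrite author's own statement) =====
-- stated objective: simpler
-- what changed: Replaces the reverse pop-loop with a prev sentinel and a defaultdict of [count,count] pairs by a forward run-collapse pass plus a Counter over run representatives, filtered and sorted.
import Mathlib
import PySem

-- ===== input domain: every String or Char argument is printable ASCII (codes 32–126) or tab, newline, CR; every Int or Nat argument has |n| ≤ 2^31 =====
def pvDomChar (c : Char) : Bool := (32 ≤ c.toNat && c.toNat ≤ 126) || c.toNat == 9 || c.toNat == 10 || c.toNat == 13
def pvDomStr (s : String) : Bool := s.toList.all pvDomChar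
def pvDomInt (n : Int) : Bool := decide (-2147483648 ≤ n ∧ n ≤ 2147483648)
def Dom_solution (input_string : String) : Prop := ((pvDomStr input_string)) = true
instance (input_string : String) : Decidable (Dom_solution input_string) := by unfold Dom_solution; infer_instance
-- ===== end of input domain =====

-- B replaces A's reverse pop-loop with a defaultdict of [count,count] pairs by a forward
-- run-collapse pass plus a Counter over run representatives (simpler decomposition, same cost).


-- ===== PORT A =====
-- str(x) applied to a 1-character string is that string; the list elements are the characters
def pvStr1 (c : Char) : String := String.ofList [c]

-- the `while q_input:` pop()-from-the-end loop, transcribed as recursion over the reversed list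
def pvALoop : List Char → String → PySem.Dict String (List Int) → PySem.Dict String (List Int)
  | [], _, d => d
  | c :: rest, prev, d =>
    let curr := pvStr1 c
    if prev == curr then pvALoop rest prev d
    else
      -- defaultdict access: lonely_dict[curr_elem]; fresh keys get [] then are overwritten
      let v := d.getD curr []
      if v.length == 0 then pvALoop rest curr (d.insert curr [1, 1])
      else
        let v1 := PySem.List.pySetD v 0 (PySem.List.pyGetD v 0 0 + 1)
        let v2 := PySem.List.pySetD v1 1 (PySem.List.pyGetD v1 1 0 + 1)
        pvALoop rest curr (d.insert curr v2)

def solution (input_string : String) : String :=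
  let qInput := input_string.toList
  let lonelyDict := pvALoop qInput.reverse "" PySem.Dict.empty
  let result := lonelyDict.keys.filter (fun k =>
    decide (2 ≤ PySem.List.pyGetD (lonelyDict.getD k []) 0 0) &&
    decide (2 ≤ PySem.List.pyGetD (lonelyDict.getD k []) 1 0))
  if result.length == 0 then "N"
  else PySem.Str.join "" (PySem.List.sorted result (fun x => x) false)

-- ===== PORT B =====
-- one step of the forward collapse loop: append ch when it differs from prev
def pvBStep (acc : List String × Option String) (c : Char) : List String × Option String :=
  let ch := String.ofList [c]
  if acc.2 == some ch then acc else (acc.1 ++ [ch], some ch)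

def solution_alt (input_string : String) : String :=
  let keys := (input_string.toList.foldl pvBStep ([], none)).1
  let counts := PySem.Dict.counter keys
  let lonely := PySem.List.sorted (counts.keys.filter (fun k => decide (2 ≤ counts.getD k 0)))
    (fun x => x) false
  if lonely = [] then "N" else PySem.Str.join "" lonely

-- ===== PRECONDITION & SPEC =====
def Spec_solution (input_string : String) (out : String) : Prop := out = solution_alt input_string
instance (input_string : String) (out : String) : Decidable (Spec_solution input_string out) := by unfold Spec_solution; infer_instance

-- ===== CLAIM (what is proved, stated in full; the proofs are below) =====
def Claim_equal_solution : Prop := ∀ (input_string : String), Dom_solution input_string → Spec_solution input_string (solution input_string)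

-- ===== LEMMAS AND PROOFS =====

-- run representatives of a char list, given the previously emitted representative
def pvReps : List Char → String → List String
  | [], _ => []
  | c :: t, prev => if prev = String.ofList [c] then pvReps t prev else String.ofList [c] :: pvReps t (String.ofList [c])

-- the representative last emitted after scanning l (p if l is empty)
def pvLastP (l : List Char) (p : String) : String :=
  match l.getLast? with
  | none => p
  | some c => String.ofList [c]

lemma pvLastP_cons (c : Char) (xs : List Char) (p : String) :
    pvLastP (c :: xs) p = pvLastP xs (String.ofList [c]) := by
  cases xs with
  | nil => simp [pvLastP]
  | cons b t =>
    cases h : (b :: t).getLast? with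
    | none => simp at h
    | some d => simp [pvLastP, h]

lemma pvReps_append : ∀ (xs ys : List Char) (p : String),
    pvReps (xs ++ ys) p = pvReps xs p ++ pvReps ys (pvLastP xs p) := by
  intro xs
  induction xs with
  | nil => intro ys p; simp [pvReps, pvLastP]
  | cons c t ih =>
    intro ys p
    by_cases h : p = String.ofList [c]
    · rw [List.cons_append]; simp only [pvReps, if_pos h]
      rw [ih, pvLastP_cons, ← h]
    · rw [List.cons_append]; simp only [pvReps, if_neg h]
      rw [ih, pvLastP_cons, List.cons_append]

lemma pvReps_irrel (c : Char) (t : List Char) (p q : String)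
    (hp : p ≠ String.ofList [c]) (hq : q ≠ String.ofList [c]) :
    pvReps (c :: t) p = pvReps (c :: t) q := by
  simp [pvReps, hp, hq]

lemma pvOfList_ne (a b : Char) (h : a ≠ b) : String.ofList [a] ≠ String.ofList [b] := by
  intro he
  have := congrArg String.toList he
  simp at this
  exact h this

lemma pvReps_reverse : ∀ (l : List Char), pvReps l.reverse "" = (pvReps l "").reverse := by
  intro l
  induction l with
  | nil => simp [pvReps]
  | cons c t ih =>
    rw [List.reverse_cons, pvReps_append, ih]
    cases t with
    | nil => simp [pvReps, pvLastP]
    | cons b t' =>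
      have hlast : pvLastP (b :: t').reverse "" = String.ofList [b] := by
        simp [pvLastP, List.getLast?_reverse]
      rw [hlast]
      by_cases hbc : b = c
      · subst hbc
        simp [pvReps]
      · have h1 := pvOfList_ne b c hbc
        have h2 := pvOfList_ne c b (Ne.symm hbc)
        have hir := pvReps_irrel b t' "" (String.ofList [c]) (by simp) h2
        rw [hir]
        simp [pvReps, h1]

-- B's collapse fold produces pvReps
lemma pvBStep_fold : ∀ (l : List Char) (acc : List String × Option String),
    (l.foldl pvBStep acc).1
      = acc.1 ++ pvReps l (match acc.2 with | none => "" | some p => p) := by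
  intro l
  induction l with
  | nil => intro acc; simp [pvReps]
  | cons c t ih =>
    intro acc
    obtain ⟨ks, prevO⟩ := acc
    rw [List.foldl_cons]
    cases prevO with
    | none =>
      have hstep : pvBStep (ks, none) c = (ks ++ [String.ofList [c]], some (String.ofList [c])) := by
        simp [pvBStep]
      rw [hstep, ih]
      simp [pvReps]
    | some p =>
      by_cases hp : p = String.ofList [c]
      · have hstep : pvBStep (ks, some p) c = (ks, some p) := by
          simp [pvBStep, hp]
        rw [hstep, ih]
        simp [pvReps, hp]
      · have hstep : pvBStep (ks, some p) c = (ks ++ [String.ofList [c]], some (String.ofList [c])) := by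
          simp [pvBStep, hp]
        rw [hstep, ih]
        simp [pvReps, hp]

-- A's loop: values are [n, n] where n counts the key among the run representatives
lemma pvIfPair (m n : Nat) (h : m = n) :
    (if m = 0 then ([] : List Int) else [(m : Int), (m : Int)])
      = (if n = 0 then ([] : List Int) else [(n : Int), (n : Int)]) := by rw [h]

lemma pvALoop_getD : ∀ (l : List Char) (prev : String) (d : PySem.Dict String (List Int))
    (f : String → Nat),
    (∀ j, d.getD j [] = if f j = 0 then ([] : List Int) else [(f j : Int), (f j : Int)]) →
    ∀ k, (pvALoop l prev d).getD k []
      = (if f k + (pvReps l prev).count k = 0 then ([] : List Int)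
         else [((f k + (pvReps l prev).count k : Nat) : Int),
               ((f k + (pvReps l prev).count k : Nat) : Int)]) := by
  intro l
  induction l with
  | nil => intro prev d f h k; simpa [pvReps] using h k
  | cons c rest ih =>
    intro prev d f h k
    by_cases hpc : prev = String.ofList [c]
    · rw [show pvALoop (c :: rest) prev d = pvALoop rest prev d by
        simp [pvALoop, pvStr1, hpc]]
      rw [show pvReps (c :: rest) prev = pvReps rest prev by simp [pvReps, hpc]]
      exact ih prev d f h k
    · rw [show pvReps (c :: rest) prev
          = String.ofList [c] :: pvReps rest (String.ofList [c]) by simp [pvReps, hpc]]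
      by_cases hf : f (String.ofList [c]) = 0
      · have hv : d.getD (String.ofList [c]) [] = ([] : List Int) := by rw [h]; simp [hf]
        have hstep : pvALoop (c :: rest) prev d
            = pvALoop rest (String.ofList [c]) (d.insert (String.ofList [c]) [1, 1]) := by
          simp [pvALoop, pvStr1, hpc, hv]
        rw [hstep]
        have h' : ∀ j, (d.insert (String.ofList [c]) [1, 1]).getD j []
            = (if (fun j => if j = String.ofList [c] then 1 else f j) j = 0 then ([] : List Int)
               else [(((fun j => if j = String.ofList [c] then 1 else f j) j : Nat) : Int),
                     (((fun j => if j = String.ofList [c] then 1 else f j) j : Nat) : Int)]) := by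
          intro j
          rw [PySem.Dict.getD_insert]
          by_cases hj : j = String.ofList [c] <;> simp [hj, h j]
        rw [ih (String.ofList [c]) _ _ h' k]
        by_cases hk : k = String.ofList [c]
        · subst hk
          exact pvIfPair _ _ (by simp [hf, Nat.add_comm])
        · have hk2 : ¬ (String.ofList [c] = k) := fun hh => hk hh.symm
          exact pvIfPair _ _ (by simp [hk, hk2])
      · have hv : d.getD (String.ofList [c]) []
            = [((f (String.ofList [c]) : Nat) : Int), ((f (String.ofList [c]) : Nat) : Int)] := by
          rw [h]; simp [hf]
        have hbeq : (prev == String.ofList [c]) = false := by simp [hpc]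
        have hlen : ((d.getD (String.ofList [c]) []).length == 0) = false := by rw [hv]; simp
        have hset : PySem.List.pySetD
              (PySem.List.pySetD [((f (String.ofList [c]) : Nat) : Int), ((f (String.ofList [c]) : Nat) : Int)] 0
                (PySem.List.pyGetD [((f (String.ofList [c]) : Nat) : Int), ((f (String.ofList [c]) : Nat) : Int)] 0 0 + 1)) 1
              (PySem.List.pyGetD (PySem.List.pySetD [((f (String.ofList [c]) : Nat) : Int), ((f (String.ofList [c]) : Nat) : Int)] 0
                (PySem.List.pyGetD [((f (String.ofList [c]) : Nat) : Int), ((f (String.ofList [c]) : Nat) : Int)] 0 0 + 1)) 1 0 + 1)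
            = [((f (String.ofList [c]) : Nat) : Int) + 1, ((f (String.ofList [c]) : Nat) : Int) + 1] := by
          simp [pysem]
        have hstep : pvALoop (c :: rest) prev d
            = pvALoop rest (String.ofList [c])
                (d.insert (String.ofList [c])
                  [((f (String.ofList [c]) : Nat) : Int) + 1, ((f (String.ofList [c]) : Nat) : Int) + 1]) := by
          simp only [pvALoop, pvStr1, hbeq, hlen, Bool.false_eq_true, if_false]
          rw [hv, hset]
        rw [hstep]
        have h' : ∀ j, (d.insert (String.ofList [c])
              [((f (String.ofList [c]) : Nat) : Int) + 1, ((f (String.ofList [c]) : Nat) : Int) + 1]).getD j []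
            = (if (fun j => if j = String.ofList [c] then f (String.ofList [c]) + 1 else f j) j = 0
               then ([] : List Int)
               else [(((fun j => if j = String.ofList [c] then f (String.ofList [c]) + 1 else f j) j : Nat) : Int),
                     (((fun j => if j = String.ofList [c] then f (String.ofList [c]) + 1 else f j) j : Nat) : Int)]) := by
          intro j
          rw [PySem.Dict.getD_insert]
          by_cases hj : j = String.ofList [c] <;> simp [hj, h j]
        rw [ih (String.ofList [c]) _ _ h' k]
        by_cases hk : k = String.ofList [c]
        · subst hk
          exact pvIfPair _ _ (by simp; omega)
        · have hk2 : ¬ (String.ofList [c] = k) := fun hh => hk hh.symm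
          exact pvIfPair _ _ (by simp [hk, hk2])

lemma pvALoop_mem_keys : ∀ (l : List Char) (prev : String) (d : PySem.Dict String (List Int)) (k : String),
    k ∈ (pvALoop l prev d).keys ↔ k ∈ d.keys ∨ k ∈ pvReps l prev := by
  intro l
  induction l with
  | nil => intro prev d k; simp [pvALoop, pvReps]
  | cons c rest ih =>
    intro prev d k
    by_cases hpc : prev = String.ofList [c]
    · rw [show pvALoop (c :: rest) prev d = pvALoop rest prev d by
        simp [pvALoop, pvStr1, hpc]]
      rw [show pvReps (c :: rest) prev = pvReps rest prev by simp [pvReps, hpc]]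
      exact ih prev d k
    · have hbeq : (prev == String.ofList [c]) = false := by simp [hpc]
      rw [show pvReps (c :: rest) prev
          = String.ofList [c] :: pvReps rest (String.ofList [c]) by simp [pvReps, hpc]]
      have hstep : ∃ v, pvALoop (c :: rest) prev d
          = pvALoop rest (String.ofList [c]) (d.insert (String.ofList [c]) v) := by
        simp only [pvALoop, pvStr1, hbeq, Bool.false_eq_true, if_false]
        split_ifs with h2
        · exact ⟨_, rfl⟩
        · exact ⟨_, rfl⟩
      obtain ⟨v, hstep⟩ := hstep
      rw [hstep, ih]
      simp [PySem.Dict.mem_keys_insert]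
      tauto

lemma pvALoop_nodup_keys : ∀ (l : List Char) (prev : String) (d : PySem.Dict String (List Int)),
    d.keys.Nodup → (pvALoop l prev d).keys.Nodup := by
  intro l
  induction l with
  | nil => intro prev d h; exact h
  | cons c rest ih =>
    intro prev d h
    by_cases hpc : prev = String.ofList [c]
    · rw [show pvALoop (c :: rest) prev d = pvALoop rest prev d by
        simp [pvALoop, pvStr1, hpc]]
      exact ih prev d h
    · have hbeq : (prev == String.ofList [c]) = false := by simp [hpc]
      have hstep : ∃ v, pvALoop (c :: rest) prev d
          = pvALoop rest (String.ofList [c]) (d.insert (String.ofList [c]) v) := by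
        simp only [pvALoop, pvStr1, hbeq, Bool.false_eq_true, if_false]
        split_ifs with h2
        · exact ⟨_, rfl⟩
        · exact ⟨_, rfl⟩
      obtain ⟨v, hstep⟩ := hstep
      rw [hstep]
      exact ih _ _ (PySem.Dict.nodup_keys_insert _ _ _ h)

-- ===== VERDICT (by name: the statement is the Claim_ definition above) =====
theorem solution_spec : Claim_equal_solution := by
  intro s hdom
  unfold Spec_solution
  -- names for the two filtered key lists
  have hAeq : solution s
      = (if (((pvALoop s.toList.reverse "" PySem.Dict.empty).keys.filter (fun k =>
            decide (2 ≤ PySem.List.pyGetD ((pvALoop s.toList.reverse "" PySem.Dict.empty).getD k []) 0 0) &&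
            decide (2 ≤ PySem.List.pyGetD ((pvALoop s.toList.reverse "" PySem.Dict.empty).getD k []) 1 0))).length == 0)
         then "N"
         else PySem.Str.join "" (PySem.List.sorted ((pvALoop s.toList.reverse "" PySem.Dict.empty).keys.filter (fun k =>
            decide (2 ≤ PySem.List.pyGetD ((pvALoop s.toList.reverse "" PySem.Dict.empty).getD k []) 0 0) &&
            decide (2 ≤ PySem.List.pyGetD ((pvALoop s.toList.reverse "" PySem.Dict.empty).getD k []) 1 0)))
            (fun x => x) false)) := rfl
  have hBkeys : (s.toList.foldl pvBStep ([], none)).1 = pvReps s.toList "" := by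
    simpa using pvBStep_fold s.toList ([], none)
  have hBeq : solution_alt s
      = (if PySem.List.sorted ((PySem.Dict.counter (pvReps s.toList "")).keys.filter (fun k =>
            decide (2 ≤ (PySem.Dict.counter (pvReps s.toList "")).getD k 0))) (fun x => x) false = []
         then "N"
         else PySem.Str.join "" (PySem.List.sorted ((PySem.Dict.counter (pvReps s.toList "")).keys.filter (fun k =>
            decide (2 ≤ (PySem.Dict.counter (pvReps s.toList "")).getD k 0))) (fun x => x) false)) := by
    unfold solution_alt
    rw [hBkeys]
  rw [hAeq, hBeq]
  set KB := pvReps s.toList "" with hKB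
  set dA := pvALoop s.toList.reverse "" PySem.Dict.empty with hdA
  -- A's dict values: [n, n] with n the number of runs of the key
  have hgetD : ∀ k, dA.getD k []
      = (if KB.count k = 0 then ([] : List Int) else [(KB.count k : Int), (KB.count k : Int)]) := by
    intro k
    have h0 : ∀ j, (PySem.Dict.empty : PySem.Dict String (List Int)).getD j []
        = if (fun _ => (0 : Nat)) j = 0 then ([] : List Int)
          else [(((fun _ => (0 : Nat)) j : Nat) : Int), (((fun _ => (0 : Nat)) j : Nat) : Int)] := by
      intro j; simp [PySem.Dict.getD_empty]
    have := pvALoop_getD s.toList.reverse "" PySem.Dict.empty (fun _ => 0) h0 k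
    rw [pvReps_reverse] at this
    simpa [List.count_reverse] using this
  -- both filter predicates say: at least two runs of this char
  have hPA : ∀ k, (decide (2 ≤ PySem.List.pyGetD (dA.getD k []) 0 0) &&
        decide (2 ≤ PySem.List.pyGetD (dA.getD k []) 1 0)) = decide (2 ≤ KB.count k) := by
    intro k
    rw [hgetD k]
    by_cases hz : KB.count k = 0
    · simp [hz, PySem.List.pyGetD, PySem.List.pyGet?]
    · have h2 : (2 ≤ (KB.count k : Int)) ↔ 2 ≤ KB.count k := by exact_mod_cast Iff.rfl
      simp [hz, pysem, h2]
  have hQ : ∀ k, (decide (2 ≤ (PySem.Dict.counter KB).getD k 0))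
      = decide (2 ≤ KB.count k) := by
    intro k
    rw [PySem.Dict.getD_counter]
    have h2 : (2 ≤ (KB.count k : Int)) ↔ 2 ≤ KB.count k := by exact_mod_cast Iff.rfl
    simp [h2]
  -- the two filtered lists are permutations of each other
  have hmemA : ∀ k, k ∈ dA.keys ↔ k ∈ KB := by
    intro k
    rw [hdA, pvALoop_mem_keys, pvReps_reverse]
    simp only [PySem.Dict.keys_empty, List.not_mem_nil, false_or, List.mem_reverse]
    exact Iff.rfl
  have hndA : (dA.keys.filter (fun k =>
        decide (2 ≤ PySem.List.pyGetD (dA.getD k []) 0 0) &&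
        decide (2 ≤ PySem.List.pyGetD (dA.getD k []) 1 0))).Nodup := by
    apply List.Nodup.filter
    rw [hdA]
    exact pvALoop_nodup_keys _ _ _ (by simp [PySem.Dict.keys_empty])
  have hndB : ((PySem.Dict.counter KB).keys.filter (fun k =>
        decide (2 ≤ (PySem.Dict.counter KB).getD k 0))).Nodup := by
    apply List.Nodup.filter
    exact PySem.Dict.nodup_keys_counter (κ := String) KB
  have hperm : (dA.keys.filter (fun k =>
        decide (2 ≤ PySem.List.pyGetD (dA.getD k []) 0 0) &&
        decide (2 ≤ PySem.List.pyGetD (dA.getD k []) 1 0))).Perm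
      ((PySem.Dict.counter KB).keys.filter (fun k =>
        decide (2 ≤ (PySem.Dict.counter KB).getD k 0))) := by
    rw [List.perm_ext_iff_of_nodup hndA hndB]
    intro k
    rw [List.mem_filter, List.mem_filter, hPA k, hQ k, hmemA k]
    have hmemB : k ∈ (PySem.Dict.counter KB).keys ↔ k ∈ KB := by
      rw [PySem.Dict.keys_counter]
      exact PySem.Set.mem_ofList (α := String) KB k
    rw [hmemB]
  have hsorted : PySem.List.sorted (dA.keys.filter (fun k =>
        decide (2 ≤ PySem.List.pyGetD (dA.getD k []) 0 0) &&
        decide (2 ≤ PySem.List.pyGetD (dA.getD k []) 1 0))) (fun x => x) false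
      = PySem.List.sorted ((PySem.Dict.counter KB).keys.filter (fun k =>
        decide (2 ≤ (PySem.Dict.counter KB).getD k 0))) (fun x => x) false :=
    PySem.List.sorted_eq_sorted_of_perm _ _ _ (fun _ _ h => h) hperm
  rw [← hsorted]
  by_cases hE : (dA.keys.filter (fun k =>
        decide (2 ≤ PySem.List.pyGetD (dA.getD k []) 0 0) &&
        decide (2 ≤ PySem.List.pyGetD (dA.getD k []) 1 0))) = []
  · simp [hE, PySem.List.sorted_eq_nil_iff]
  · have hlen : ¬ ((dA.keys.filter (fun k =>
        decide (2 ≤ PySem.List.pyGetD (dA.getD k []) 0 0) &&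
        decide (2 ≤ PySem.List.pyGetD (dA.getD k []) 1 0))).length = 0) := by
      simpa [List.length_eq_zero_iff] using hE
    rw [if_neg (by simpa using hlen), if_neg (by rw [PySem.List.sorted_eq_nil_iff]; exact hE)]
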